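-- pv_equiv track=rewrite | github.com/eric-s-s/dice-tables | time_trials/numpydict.py | make_start_val_and_list
-- ===== SOURCE A (Python) =====
-- def make_start_val_and_list(input_dic):
--     tuple_list = sorted(input_dic.items())
--     start_val = tuple_list[0][0]
--     end_val = tuple_list[-1][0]
--     out_list = [0] * (end_val - start_val + 1)
--     for index, value in tuple_list:
--         list_index = index - start_val
--         out_list[list_index] = value
--     return start_val, out_list
-- ===== SOURCE B (Python) =====
-- def make_start_val_and_list(input_dic):
--     keys = sorted(input_dic)
--     start_val = keys[0]
--     end_val = keys[-1]
--     out_list = [input_dic.get(i, 0) for i in range(start_val, end_val + 1)]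
--     return start_val, out_list
-- ===== Notes on version B (the rewrite author's own statement) =====
-- stated objective: idiomatic
-- what changed: B gathers instead of scatters: it sorts only the keys, then builds the result by iterating over the output positions range(start, end+1) and looking each position up in the dict with .get(i, 0), instead of zero-initializing a list and writing each sorted (key, value) item into it by offset.
import Mathlib
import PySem

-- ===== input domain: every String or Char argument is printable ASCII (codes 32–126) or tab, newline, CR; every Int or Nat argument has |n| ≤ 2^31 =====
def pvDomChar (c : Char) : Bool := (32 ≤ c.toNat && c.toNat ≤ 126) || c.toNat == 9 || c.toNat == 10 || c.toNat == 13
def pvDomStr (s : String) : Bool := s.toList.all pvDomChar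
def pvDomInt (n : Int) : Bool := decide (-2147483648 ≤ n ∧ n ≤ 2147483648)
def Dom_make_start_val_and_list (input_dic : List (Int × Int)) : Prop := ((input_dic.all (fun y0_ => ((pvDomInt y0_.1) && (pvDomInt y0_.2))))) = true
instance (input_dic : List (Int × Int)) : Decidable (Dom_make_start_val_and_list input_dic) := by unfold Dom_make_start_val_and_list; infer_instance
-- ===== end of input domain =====

-- B replaces A's scatter (zero-init a list, write each sorted item in by offset) with a gather
-- (sort the keys, map each output position over range(start, end+1) to a dict lookup with default 0);
-- same cost, more idiomatic. Equivalence is proved on nonempty inputs with distinct keys (Pre_).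

-- ===== PORT A =====
-- 'sorted(input_dic.items())' sorts the (key, value) pairs lexicographically = sorted2.
-- 'tuple_list[0]'/'tuple_list[-1]' raise IndexError on an empty dict: excluded by Pre_.
-- 'out_list[list_index] = value' is pySetD: the index key - min_key is always in range (never raises).
def make_start_val_and_list (input_dic : List (Int × Int)) : Int × List Int :=
  let tuple_list := PySem.List.sorted2 input_dic Prod.fst Prod.snd
  let start_val := (PySem.List.pyGetD tuple_list 0 (0, 0)).1
  let end_val := (PySem.List.pyGetD tuple_list (-1) (0, 0)).1
  let out0 : List Int := List.replicate (end_val - start_val + 1).toNat 0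
  let out_list := tuple_list.foldl (fun acc p => PySem.List.pySetD acc (p.1 - start_val) p.2) out0
  (start_val, out_list)

-- ===== PORT B =====
-- 'sorted(input_dic)' iterates the dict's keys (insertion order = map Prod.fst) and sorts them;
-- 'keys[0]'/'keys[-1]' raise IndexError on an empty dict: excluded by Pre_.
def make_start_val_and_list_alt (input_dic : List (Int × Int)) : Int × List Int :=
  let keys := PySem.List.sorted (input_dic.map Prod.fst) (fun x => x)
  let start_val := PySem.List.pyGetD keys 0 0
  let end_val := PySem.List.pyGetD keys (-1) 0
  let out_list := (PySem.List.pyRange start_val (end_val + 1) 1).map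
    (fun i => PySem.Dict.getD (PySem.Dict.mk input_dic) i 0)
  (start_val, out_list)

-- ===== PRECONDITION & SPEC =====
-- Pre_ excludes the empty dict, on which both Pythons raise IndexError, and association lists with
-- duplicate keys, which do not represent a Python dict (dict keys are unique) — so no input on which
-- the Python A returns is excluded.
def Pre_make_start_val_and_list (input_dic : List (Int × Int)) : Prop :=
  input_dic ≠ [] ∧ (input_dic.map Prod.fst).Nodup
instance (input_dic : List (Int × Int)) : Decidable (Pre_make_start_val_and_list input_dic) := by
  unfold Pre_make_start_val_and_list; infer_instance
def pvWitness_make_start_val_and_list : (List (Int × Int)) := [(2, 5), (0, 1)]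
def Spec_make_start_val_and_list (input_dic : List (Int × Int)) (out : Int × List Int) : Prop := out = make_start_val_and_list_alt input_dic
instance (input_dic : List (Int × Int)) (out : Int × List Int) : Decidable (Spec_make_start_val_and_list input_dic out) := by unfold Spec_make_start_val_and_list; infer_instance

-- ===== CLAIM (what is proved, stated in full; the proofs are below) =====
def Claim_equal_make_start_val_and_list : Prop := ∀ (input_dic : List (Int × Int)), Dom_make_start_val_and_list input_dic → Pre_make_start_val_and_list input_dic → Spec_make_start_val_and_list input_dic (make_start_val_and_list input_dic)

-- ===== LEMMAS AND PROOFS =====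

-- congruence of insertion with respect to the comparator (on the compared elements)
theorem pv_insertBy_congr {α : Type} (f g : α → α → Bool) (x : α) (ys : List α)
    (h : ∀ b ∈ ys, f x b = g x b) :
    PySem.List.insertBy f x ys = PySem.List.insertBy g x ys := by
  induction ys with
  | nil => rfl
  | cons y ys ih =>
    simp only [PySem.List.insertBy, h y (List.mem_cons_self)]
    split
    · rfl
    · simp only [List.cons.injEq, true_and]
      exact ih (fun b hb => h b (List.mem_cons_of_mem _ hb))

theorem pv_foldl_insertBy_congr {α : Type} (f g : α → α → Bool) :
    ∀ (l acc : List α),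
    (∀ a ∈ l, ∀ b, (b ∈ acc ∨ b ∈ l) → f a b = g a b) →
    l.foldl (fun acc x => PySem.List.insertBy f x acc) acc
      = l.foldl (fun acc x => PySem.List.insertBy g x acc) acc := by
  intro l
  induction l with
  | nil => intro acc _; rfl
  | cons a l ih =>
    intro acc h
    simp only [List.foldl_cons]
    rw [pv_insertBy_congr f g a acc
      (fun b hb => h a (List.mem_cons_self) b (Or.inl hb))]
    exact ih _ (fun a' ha' b hb => by
      refine h a' (List.mem_cons_of_mem _ ha') b ?_
      rcases hb with hb | hb
      · rw [PySem.List.mem_insertBy] at hb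
        rcases hb with hb | hb
        · exact Or.inr (hb ▸ List.mem_cons_self)
        · exact Or.inl hb
      · exact Or.inr (List.mem_cons_of_mem _ hb))

-- with pairwise-distinct keys the lexicographic pair sort is the key sort
theorem pv_sorted2_eq_sorted_fst (d : List (Int × Int)) (hnd : (d.map Prod.fst).Nodup) :
    PySem.List.sorted2 d Prod.fst Prod.snd = PySem.List.sorted d Prod.fst := by
  have hinj : ∀ a ∈ d, ∀ b ∈ d, a.1 = b.1 → a = b := by
    intro a ha b hb hab
    exact List.inj_on_of_nodup_map hnd ha hb hab
  show d.foldl (fun acc x => PySem.List.insertBy _ x acc) [] =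
       d.foldl (fun acc x => PySem.List.insertBy _ x acc) []
  apply pv_foldl_insertBy_congr
  intro a ha b hb
  rcases hb with hb | hb
  · cases hb
  rcases lt_trichotomy a.1 b.1 with hlt | heq | hgt
  · simp [hlt, not_lt.mpr (le_of_lt hlt)]
  · have : a = b := hinj a ha b hb heq
    subst this
    simp
  · simp [hgt, not_lt.mpr (le_of_lt hgt)]

theorem pv_pairwise_le_getLast (l : List (Int × Int))
    (hp : l.Pairwise (fun a b => a.1 ≤ b.1)) (h : l ≠ []) :
    ∀ x ∈ l, x.1 ≤ (l.getLast h).1 := by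
  induction l with
  | nil => exact absurd rfl h
  | cons a l ih =>
    intro x hx
    rcases eq_or_ne l [] with hl | hl
    · subst hl
      simp at hx
      simp [hx]
    · rw [List.getLast_cons hl]
      rcases List.mem_cons.mp hx with hx | hx
      · subst hx
        exact (List.pairwise_cons.mp hp).1 _ (List.getLast_mem hl)
      · exact ih (List.pairwise_cons.mp hp).2 hl x hx

-- length is preserved by the scatter loop
theorem pv_length_scatter (start : Int) :
    ∀ (l : List (Int × Int)) (acc : List Int),
    (l.foldl (fun acc p => PySem.List.pySetD acc (p.1 - start) p.2) acc).length = acc.length := by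
  intro l
  induction l with
  | nil => intro acc; rfl
  | cons p l ih =>
    intro acc
    simp only [List.foldl_cons]
    rw [ih, PySem.List.length_pySetD]

-- the scatter loop read back at position j is the first pair with key start + j (or the old entry)
theorem pv_scatter_get (start : Int) :
    ∀ (l : List (Int × Int)) (acc : List Int) (j : Nat), j < acc.length →
    (∀ p ∈ l, start ≤ p.1) → (∀ p ∈ l, p.1 - start < (acc.length : Int)) →
    (l.map Prod.fst).Nodup →
    PySem.List.pyGetD (l.foldl (fun a p => PySem.List.pySetD a (p.1 - start) p.2) acc) (j : Int) 0
      = ((l.find? (fun p => p.1 == start + (j : Int))).map Prod.snd).getD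
          (PySem.List.pyGetD acc (j : Int) 0) := by
  intro l
  induction l with
  | nil => intro acc j hj _ _ _; simp
  | cons p l ih =>
    intro acc j hj hpos hlt hnd
    have hp0 : start ≤ p.1 := hpos p (List.mem_cons_self)
    have hpl : p.1 - start < (acc.length : Int) := hlt p (List.mem_cons_self)
    set n : Nat := (p.1 - start).toNat with hn
    have hcast : p.1 - start = (n : Int) := (Int.toNat_of_nonneg (by omega)).symm
    have hnlen : n < acc.length := by omega
    have hkey : p.1 = start + (n : Int) := by omega
    simp only [List.foldl_cons, hcast]
    have hlen' : (PySem.List.pySetD acc ((n : Int)) p.2).length = acc.length :=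
      PySem.List.length_pySetD acc _ _
    rw [ih (PySem.List.pySetD acc ((n : Int)) p.2) j (by omega)
        (fun q hq => hpos q (List.mem_cons_of_mem _ hq))
        (fun q hq => by rw [hlen']; exact hlt q (List.mem_cons_of_mem _ hq))
        ((List.map_cons .. ▸ hnd).of_cons)]
    rw [PySem.List.pyGetD_pySetD_natCast acc n j p.2 0 hnlen]
    by_cases hjn : p.1 = start + (j : Int)
    · have hj_n : j = n := by omega
      have hnotmem : p.1 ∉ l.map Prod.fst := by
        have h2 : (p.1 :: l.map Prod.fst).Nodup := by
          simpa using hnd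
        exact (List.nodup_cons.mp h2).1
      have hfind : l.find? (fun q => q.1 == start + (j : Int)) = none := by
        rw [List.find?_eq_none]
        intro q hq hqk
        simp only [beq_iff_eq] at hqk
        exact hnotmem (by rw [hjn, ← hqk]; exact List.mem_map_of_mem hq)
      rw [List.find?_cons_of_pos (by simp [hjn]), hfind]
      simp [hj_n]
    · have hjn' : j ≠ n := by omega
      rw [List.find?_cons_of_neg (by simp [hjn])]
      simp [hjn']

-- sorting the keys is projecting the sorted pairs (keys distinct)
theorem pv_keys_eq (d : List (Int × Int)) (hnd : (d.map Prod.fst).Nodup) :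
    PySem.List.sorted (d.map Prod.fst) (fun x => x)
      = (PySem.List.sorted d Prod.fst).map Prod.fst := by
  apply PySem.List.sorted_eq_of_perm_of_pairwise_lt
  · exact (PySem.List.sorted_perm d Prod.fst false).map Prod.fst
  · set tl' := PySem.List.sorted d Prod.fst with htl'
    have hperm := (PySem.List.sorted_perm d Prod.fst false).map Prod.fst
    have hndtl : ((PySem.List.sorted d Prod.fst).map Prod.fst).Nodup := hperm.nodup_iff.mpr hnd
    have h1 := PySem.List.sorted_pairwise d Prod.fst
    have hndtl' : tl'.Pairwise (fun a b => a.1 ≠ b.1) := List.pairwise_map.mp hndtl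
    rw [List.pairwise_map]
    exact (h1.and hndtl').imp (fun h => lt_of_le_of_ne h.1 h.2)

-- the first pair with a given key in any rearrangement of d is the dict lookup
theorem pv_find_eq_dict_getD (d tl : List (Int × Int)) (hnd : (d.map Prod.fst).Nodup)
    (hmem : ∀ q, q ∈ tl ↔ q ∈ d) (k : Int) :
    ((tl.find? (fun q => q.1 == k)).map Prod.snd).getD 0
      = PySem.Dict.getD (PySem.Dict.mk d) k 0 := by
  cases hfind : tl.find? (fun q => q.1 == k) with
  | some q =>
    have hq1 : q.1 = k := by simpa using List.find?_some hfind
    have hqd : q ∈ d := (hmem q).mp (List.mem_of_find?_eq_some hfind)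
    have hgd : PySem.Dict.getD (PySem.Dict.mk d) q.1 0 = q.2 := by
      refine PySem.Dict.getD_of_mem_items (PySem.Dict.mk d) ?_ ?_ 0
      · simpa using hqd
      · simpa [PySem.Dict.keys_mk] using hnd
    rw [← hq1, hgd]
    rfl
  | none =>
    have hnot : k ∉ d.map Prod.fst := by
      intro hk
      obtain ⟨q, hqd, hqk⟩ := List.mem_map.mp hk
      have := List.find?_eq_none.mp hfind q ((hmem q).mpr hqd)
      simp [hqk] at this
    have : PySem.Dict.getD (PySem.Dict.mk d) k 0 = 0 := by
      refine PySem.Dict.getD_of_not_contains _ _ ?_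
      rw [PySem.Dict.contains_eq_decide_mem_keys]
      simpa [PySem.Dict.keys_mk] using hnot
    simp [this]

-- ===== VERDICT (by name: the statement is the Claim_ definition above) =====
theorem make_start_val_and_list_spec : Claim_equal_make_start_val_and_list := by
  intro d _ hPre
  obtain ⟨hne, hnd⟩ := hPre
  unfold Spec_make_start_val_and_list make_start_val_and_list make_start_val_and_list_alt
  rw [pv_sorted2_eq_sorted_fst d hnd, pv_keys_eq d hnd]
  set tl := PySem.List.sorted d Prod.fst with htldef
  have htlne : tl ≠ [] := by
    intro h
    exact hne ((PySem.List.sorted_eq_nil_iff d Prod.fst false).mp h)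
  obtain ⟨m, t, htl⟩ : ∃ m t, tl = m :: t := by
    cases h : tl with
    | nil => exact absurd h htlne
    | cons m t => exact ⟨m, t, rfl⟩
  have hmapne : tl.map Prod.fst ≠ [] := by simp [htl]
  -- head and last of tl and of its key projection
  have hstartA : PySem.List.pyGetD tl 0 (0, 0) = m := by
    rw [htl]; exact PySem.List.pyGetD_zero_cons m t (0, 0)
  have hstartB : PySem.List.pyGetD (tl.map Prod.fst) 0 0 = m.1 := by
    rw [htl, List.map_cons]; exact PySem.List.pyGetD_zero_cons m.1 _ 0
  have hendA : PySem.List.pyGetD tl (-1) (0, 0) = tl.getLast htlne :=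
    PySem.List.pyGetD_neg_one tl (0, 0) htlne
  have hendB : PySem.List.pyGetD (tl.map Prod.fst) (-1) 0 = (tl.getLast htlne).1 := by
    rw [PySem.List.pyGetD_neg_one _ 0 hmapne, List.getLast_map]
  show ((PySem.List.pyGetD tl 0 (0, 0)).1,
      tl.foldl (fun acc p => PySem.List.pySetD acc (p.1 - (PySem.List.pyGetD tl 0 (0, 0)).1) p.2)
        (List.replicate ((PySem.List.pyGetD tl (-1) (0, 0)).1
          - (PySem.List.pyGetD tl 0 (0, 0)).1 + 1).toNat 0))
    = (PySem.List.pyGetD (tl.map Prod.fst) 0 0,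
      (PySem.List.pyRange (PySem.List.pyGetD (tl.map Prod.fst) 0 0)
          (PySem.List.pyGetD (tl.map Prod.fst) (-1) 0 + 1) 1).map
        (fun i => PySem.Dict.getD (PySem.Dict.mk d) i 0))
  rw [hstartA, hstartB, hendA, hendB]
  set start : Int := m.1 with hstartdef
  set endv : Int := (tl.getLast htlne).1 with hendvdef
  -- bounds: every key of tl lies in [start, endv]
  have hmemtl : ∀ q, q ∈ tl ↔ q ∈ d := fun q => PySem.List.mem_sorted d Prod.fst false q
  have hstart_le : ∀ p ∈ tl, start ≤ p.1 := by
    intro p hp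
    exact PySem.List.key_head_sorted_le d Prod.fst (htldef ▸ htl) p ((hmemtl p).mp hp)
  have hend_ge : ∀ p ∈ tl, p.1 ≤ endv :=
    pv_pairwise_le_getLast tl (PySem.List.sorted_pairwise d Prod.fst) htlne
  have hse : start ≤ endv := hend_ge m (htl ▸ List.mem_cons_self)
  have hndtl : (tl.map Prod.fst).Nodup :=
    ((PySem.List.sorted_perm d Prod.fst false).map Prod.fst).nodup_iff.mpr hnd
  set N : Nat := (endv - start + 1).toNat with hNdef
  have hNcast : (N : Int) = endv - start + 1 := Int.toNat_of_nonneg (by omega)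
  -- the two output lists agree
  refine Prod.ext rfl ?_
  show tl.foldl (fun acc p => PySem.List.pySetD acc (p.1 - start) p.2) (List.replicate N 0)
      = (PySem.List.pyRange start (endv + 1) 1).map (fun i => PySem.Dict.getD (PySem.Dict.mk d) i 0)
  have hlenA : (tl.foldl (fun acc p => PySem.List.pySetD acc (p.1 - start) p.2)
      (List.replicate N 0)).length = N := by
    rw [pv_length_scatter start tl (List.replicate N 0), List.length_replicate]
  have hlenB : ((PySem.List.pyRange start (endv + 1) 1).map
      (fun i => PySem.Dict.getD (PySem.Dict.mk d) i 0)).length = N := by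
    rw [List.length_map, PySem.List.length_pyRange_one]
    omega
  apply List.ext_getElem (by rw [hlenA, hlenB])
  intro j hj1 hj2
  have hjN : j < N := by omega
  -- left side via the scatter lemma
  have hA : (tl.foldl (fun acc p => PySem.List.pySetD acc (p.1 - start) p.2)
      (List.replicate N 0))[j]'hj1
      = ((tl.find? (fun q => q.1 == start + (j : Int))).map Prod.snd).getD 0 := by
    have h0 := pv_scatter_get start tl (List.replicate N 0) j
      (by rw [List.length_replicate]; exact hjN)
      hstart_le
      (fun p hp => by rw [List.length_replicate, hNcast]; have := hend_ge p hp; omega)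
      hndtl
    rw [PySem.List.pyGetD_eq_getElem _ 0 (by omega) (by rw [hlenA]; exact_mod_cast hjN)] at h0
    rw [PySem.List.pyGetD_eq_getElem _ 0 (by omega)
      (by rw [List.length_replicate]; exact_mod_cast hjN)] at h0
    simp only [Int.toNat_natCast] at h0
    rw [h0, List.getElem_replicate]
  -- right side is the dict lookup at start + j
  have hB : ((PySem.List.pyRange start (endv + 1) 1).map
      (fun i => PySem.Dict.getD (PySem.Dict.mk d) i 0))[j]'hj2
      = PySem.Dict.getD (PySem.Dict.mk d) (start + (j : Int)) 0 := by
    rw [List.getElem_map, PySem.List.getElem_pyRange_one]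
  rw [hA, hB]
  exact pv_find_eq_dict_getD d tl hnd hmemtl (start + (j : Int))
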